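-- pv_equiv track=rewrite | github.com/andyudina/algorithms-tasks | find_rotation_point.py | find_rotation_point
-- ===== SOURCE A (Python) =====
-- def find_rotation_point(list_):
--     """
--     Find rotation point in list of words, where first part is
--     in reversed alphabetical order and second part is in normal order
--     Uses O(n) time
--     """
--     assert len(list_) >= 3, \
--         "List should have at least 3 words"
--     index = 1
--     # iterate over list_[1:-1]
--     while (index < len(list_) - 1):
--         # assume we don't have same words in a list
--         if list_[index] < list_[index - 1] and \
--            list_[index] < list_[index + 1]:
--             # rotation point should be "earlier" in the alphabetic order
--             # than both previous and next item
--             return index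
--         index += 1
--     # no rotation points found
--     # list is sorted in one direction
--     return None
-- ===== SOURCE B (Python) =====
-- def find_rotation_point(list_):
--     """
--     Divide-and-conquer: the first valley index of an interval is the first
--     valley of its left half, or, failing that, of its right half. Recursion
--     depth is O(log n) instead of A's index-stepping while loop.
--     """
--     assert len(list_) >= 3, \
--         "List should have at least 3 words"
--
--     def first_valley(lo, hi):
--         # first index i in [lo, hi) with list_[i] smaller than both
--         # neighbours, or None
--         if hi - lo == 0:
--             return None
--         if hi - lo == 1:
--             if list_[lo] < list_[lo - 1] and list_[lo] < list_[lo + 1]: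
--                 return lo
--             return None
--         mid = (lo + hi) // 2
--         left = first_valley(lo, mid)
--         return left if left is not None else first_valley(mid, hi)
--
--     return first_valley(1, len(list_) - 1)
-- ===== Notes on version B (the rewrite author's own statement) =====
-- stated objective: alternative
-- what changed: B replaces A's index-stepping while loop by a divide-and-conquer recursion: the first valley index of an interval is the first valley of its left half, otherwise of its right half (same O(n) work, O(log n) recursion depth, a different traversal structure).
import Mathlib
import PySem

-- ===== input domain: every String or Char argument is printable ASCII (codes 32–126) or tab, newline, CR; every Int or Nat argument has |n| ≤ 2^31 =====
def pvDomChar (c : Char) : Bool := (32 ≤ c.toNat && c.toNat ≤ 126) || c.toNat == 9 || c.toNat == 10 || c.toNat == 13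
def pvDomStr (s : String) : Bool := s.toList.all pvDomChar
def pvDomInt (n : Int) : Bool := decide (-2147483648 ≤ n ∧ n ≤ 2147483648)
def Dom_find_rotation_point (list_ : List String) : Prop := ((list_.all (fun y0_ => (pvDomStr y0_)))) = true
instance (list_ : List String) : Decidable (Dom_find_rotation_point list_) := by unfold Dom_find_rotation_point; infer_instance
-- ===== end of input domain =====

-- B replaces A's index-stepping while loop by a divide-and-conquer recursion
-- (first valley of the left half, otherwise of the right half): same O(n) work,
-- a different traversal structure (objective: alternative).

-- ===== PORT A =====
-- the while loop of A: index walks from 1 while index < len(list_) - 1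
def findRotLoop (list_ : List String) (index : Nat) : Option Int :=
  if _h : index < list_.length - 1 then
    -- here 1 ≤ index < len-1, so all three accesses are in range (no IndexError)
    if list_.getD index "" < list_.getD (index - 1) "" ∧
       list_.getD index "" < list_.getD (index + 1) "" then
      some (index : Int)
    else
      findRotLoop list_ (index + 1)
  else
    none
termination_by list_.length - 1 - index
decreasing_by omega

def find_rotation_point (list_ : List String) : Option Int :=
  -- the assert raises AssertionError for len < 3: those inputs are outside Pre_
  if 3 ≤ list_.length then findRotLoop list_ 1 else none

-- ===== PORT B =====
-- first_valley(lo, hi) of Source B: divide and conquer on the interval [lo, hi)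
def firstValley (list_ : List String) (lo hi : Nat) : Option Int :=
  if hi - lo = 0 then none
  else if hi - lo = 1 then
    if list_.getD lo "" < list_.getD (lo - 1) "" ∧
       list_.getD lo "" < list_.getD (lo + 1) "" then some (lo : Int)
    else none
  else
    let mid := (lo + hi) / 2
    match firstValley list_ lo mid with
    | some r => some r
    | none => firstValley list_ mid hi
termination_by hi - lo
decreasing_by all_goals omega

def find_rotation_point_alt (list_ : List String) : Option Int :=
  if 3 ≤ list_.length then firstValley list_ 1 (list_.length - 1) else none

-- ===== PRECONDITION & SPEC =====
-- A's assert raises AssertionError on lists with fewer than 3 words: exactly those are excluded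
def Pre_find_rotation_point (list_ : List String) : Prop := 3 ≤ list_.length
instance (list_ : List String) : Decidable (Pre_find_rotation_point list_) := by
  unfold Pre_find_rotation_point; infer_instance

def pvWitness_find_rotation_point : List String := ["cherry", "apple", "banana"]

def Spec_find_rotation_point (list_ : List String) (out : Option Int) : Prop := out = find_rotation_point_alt list_
instance (list_ : List String) (out : Option Int) : Decidable (Spec_find_rotation_point list_ out) := by unfold Spec_find_rotation_point; infer_instance

-- ===== CLAIM (what is proved, stated in full; the proofs are below) =====
def Claim_equal_find_rotation_point : Prop := ∀ (list_ : List String), Dom_find_rotation_point list_ → Pre_find_rotation_point list_ → Spec_find_rotation_point list_ (find_rotation_point list_)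

-- ===== LEMMAS AND PROOFS =====

-- linear scan over [lo, hi), the common reference both ports are reduced to
def scanValley (list_ : List String) (lo hi : Nat) : Option Int :=
  if _h : lo < hi then
    if list_.getD lo "" < list_.getD (lo - 1) "" ∧
       list_.getD lo "" < list_.getD (lo + 1) "" then some (lo : Int)
    else scanValley list_ (lo + 1) hi
  else none
termination_by hi - lo
decreasing_by omega

lemma scan_none (l : List String) (lo hi : Nat) (h : ¬ lo < hi) :
    scanValley l lo hi = none := by
  rw [scanValley]; exact dif_neg h

lemma scan_step (l : List String) (lo hi : Nat) (h : lo < hi) :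
    scanValley l lo hi =
      (if l.getD lo "" < l.getD (lo - 1) "" ∧ l.getD lo "" < l.getD (lo + 1) ""
       then some (lo : Int) else scanValley l (lo + 1) hi) := by
  rw [scanValley]; exact dif_pos h

lemma findRotLoop_eq_scan_aux (l : List String) :
    ∀ (n i : Nat), l.length - 1 - i ≤ n → findRotLoop l i = scanValley l i (l.length - 1) := by
  intro n
  induction n with
  | zero =>
    intro i h
    rw [findRotLoop, dif_neg (by omega), scan_none l i _ (by omega)]
  | succ n ih =>
    intro i h
    by_cases hlt : i < l.length - 1
    · rw [findRotLoop, dif_pos hlt, scan_step l i _ hlt]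
      split_ifs with hc
      · rfl
      · exact ih (i + 1) (by omega)
    · rw [findRotLoop, dif_neg hlt, scan_none l i _ hlt]

lemma scan_split (l : List String) (hi : Nat) :
    ∀ (n lo mid : Nat), mid - lo ≤ n → lo ≤ mid → mid ≤ hi →
      scanValley l lo hi =
        (match scanValley l lo mid with
         | some r => some r
         | none => scanValley l mid hi) := by
  intro n
  induction n with
  | zero =>
    intro lo mid h h1 h2
    have : lo = mid := by omega
    subst this
    rw [scan_none l lo lo (by omega)]
  | succ n ih =>
    intro lo mid h h1 h2
    by_cases hlt : lo < mid
    · rw [scan_step l lo hi (by omega), scan_step l lo mid hlt]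
      split_ifs with hc
      · rfl
      · exact ih (lo + 1) mid (by omega) (by omega) h2
    · have : lo = mid := by omega
      subst this
      rw [scan_none l lo lo (by omega)]

lemma firstValley_eq_scan_aux (l : List String) :
    ∀ (n lo hi : Nat), hi - lo ≤ n → firstValley l lo hi = scanValley l lo hi := by
  intro n
  induction n with
  | zero =>
    intro lo hi h
    rw [firstValley, if_pos (by omega), scan_none l lo hi (by omega)]
  | succ n ih =>
    intro lo hi h
    by_cases h0 : hi - lo = 0
    · rw [firstValley, if_pos h0, scan_none l lo hi (by omega)]
    · by_cases h1 : hi - lo = 1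
      · rw [firstValley, if_neg h0, if_pos h1, scan_step l lo hi (by omega)]
        split_ifs with hc
        · rfl
        · rw [scan_none l (lo + 1) hi (by omega)]
      · rw [firstValley, if_neg h0, if_neg h1]
        show (match firstValley l lo ((lo + hi) / 2) with
              | some r => some r
              | none => firstValley l ((lo + hi) / 2) hi) = scanValley l lo hi
        have hmid1 : lo ≤ (lo + hi) / 2 := by omega
        have hmid2 : (lo + hi) / 2 ≤ hi := by omega
        rw [ih lo ((lo + hi) / 2) (by omega), ih ((lo + hi) / 2) hi (by omega),
            scan_split l hi ((lo + hi) / 2 - lo) lo ((lo + hi) / 2) le_rfl hmid1 hmid2]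

-- ===== VERDICT (by name: the statement is the Claim_ definition above) =====
theorem find_rotation_point_spec : Claim_equal_find_rotation_point := by
  intro l _ hpre
  unfold Spec_find_rotation_point find_rotation_point find_rotation_point_alt
  have hl : 3 ≤ l.length := hpre
  rw [if_pos hl, if_pos hl,
      findRotLoop_eq_scan_aux l (l.length - 1 - 1) 1 le_rfl,
      firstValley_eq_scan_aux l (l.length - 1 - 1) 1 (l.length - 1) le_rfl]
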